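-- pv_equiv track=rewrite | github.com/colek319/aoc2023 | d0/solution.py | get_most_recent_number
-- ===== SOURCE A (Python) =====
-- one = 'one'
--
-- two = 'two'
--
-- three = 'three'
--
-- four = 'four'
--
-- five = 'five'
--
-- six = 'six'
--
-- seven = 'seven'
--
-- eight = 'eight'
--
-- nine = 'nine'
--
-- def get_most_recent_number(word: str):
--     words_to_check = []
--     if len(word) > 2:
--         # add 3 letter words
--         words_to_check.append(one)
--         words_to_check.append(two)
--         words_to_check.append(six)
--     if len(word) > 3:
--         # add 4 letter words
--         words_to_check.append(four)
--         words_to_check.append(five)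
--         words_to_check.append(nine)
--     if len(word) > 4:
--         # add 5 letter words
--         words_to_check.append(three)
--         words_to_check.append(seven)
--         words_to_check.append(eight)
--
--     match = None
--     for w in words_to_check:
--         word_idx = len(word) - len(w)
--         if word[word_idx:] == w:
--             match = w
--
--     if match == one:
--         return '1'
--     elif match == two:
--         return '2'
--     elif match == three:
--         return '3'
--     elif match == four:
--         return '4'
--     elif match == five:
--         return '5'
--     elif match == six:
--         return '6'
--     elif match == seven:
--         return '7'
--     elif match == eight:
--         return '8'
--     elif match == nine:
--         return '9'
--     else:
--         return None
-- ===== SOURCE B (Python) =====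
-- # B: walk the string backwards through a trie of the reversed digit words
-- # (a character automaton), instead of comparing whole words against the tail.
-- # Correct because a digit word matches iff it is a suffix of the string, and
-- # no digit word is a suffix of another, so the first completed word is the answer.
--
-- def _build():
--     # flat trie: nodes[i] = [digit_or_None, {char: child_index}]
--     nodes = [[None, {}]]
--     for w, d in [('one', '1'), ('two', '2'), ('three', '3'), ('four', '4'),
--                  ('five', '5'), ('six', '6'), ('seven', '7'), ('eight', '8'),
--                  ('nine', '9')]:
--         i = 0
--         for ch in reversed(w):
--             nxt = nodes[i][1].get(ch)
--             if nxt is None: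
--                 nodes.append([None, {}])
--                 nxt = len(nodes) - 1
--                 nodes[i][1][ch] = nxt
--             i = nxt
--         nodes[i][0] = d
--     return nodes
--
-- _NODES = _build()
--
-- def get_most_recent_number(word: str):
--     i = 0
--     for ch in reversed(word):
--         i = _NODES[i][1].get(ch)
--         if i is None:
--             return None
--         d = _NODES[i][0]
--         if d is not None:
--             return d
--     return None
-- ===== Notes on version B (the rewrite author's own statement) =====
-- stated objective: alternative
-- what changed: Replaces A's conditionally built nine-word candidate list, per-word suffix slicing/comparison and nine-branch word-to-digit if-chain by a flat trie of the reversed digit words walked character by character backwards over the string (a character automaton); correct because no digit word is a suffix of another, so the first completed word is the unique match.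
import Mathlib
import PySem

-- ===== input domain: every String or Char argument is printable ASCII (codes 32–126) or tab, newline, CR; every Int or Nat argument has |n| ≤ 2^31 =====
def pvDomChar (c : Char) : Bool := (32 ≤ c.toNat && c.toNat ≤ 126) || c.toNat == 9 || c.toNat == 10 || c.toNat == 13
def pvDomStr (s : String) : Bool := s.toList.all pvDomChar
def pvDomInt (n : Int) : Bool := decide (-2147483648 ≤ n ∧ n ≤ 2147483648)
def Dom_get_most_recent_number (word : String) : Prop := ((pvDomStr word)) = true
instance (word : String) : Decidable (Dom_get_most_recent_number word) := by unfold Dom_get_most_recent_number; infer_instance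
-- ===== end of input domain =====

-- B replaces A's nine whole-word suffix comparisons and nine-branch if-chain by a trie of the
-- reversed digit words walked backwards over the string (a character automaton); alternative algorithm.

-- ===== PORT A =====
-- module-level constants of Source A
def pyOne : String := "one"
def pyTwo : String := "two"
def pyThree : String := "three"
def pyFour : String := "four"
def pyFive : String := "five"
def pySix : String := "six"
def pySeven : String := "seven"
def pyEight : String := "eight"
def pyNine : String := "nine"

def get_most_recent_number (word : String) : Option String :=
  -- words_to_check built by the three conditional append blocks
  let words_to_check : List String :=
    (if PySem.Str.len word > 2 then [pyOne, pyTwo, pySix] else [])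
    ++ (if PySem.Str.len word > 3 then [pyFour, pyFive, pyNine] else [])
    ++ (if PySem.Str.len word > 4 then [pyThree, pySeven, pyEight] else [])
  -- for w in words_to_check: word_idx = len(word) - len(w); if word[word_idx:] == w: match = w
  let m : Option String := words_to_check.foldl
    (fun m w =>
      let word_idx : Int := PySem.Str.len word - PySem.Str.len w
      if PySem.Str.slice word (some word_idx) none = w then some w else m) none
  if m = some pyOne then some "1"
  else if m = some pyTwo then some "2"
  else if m = some pyThree then some "3"
  else if m = some pyFour then some "4"
  else if m = some pyFive then some "5"
  else if m = some pySix then some "6"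
  else if m = some pySeven then some "7"
  else if m = some pyEight then some "8"
  else if m = some pyNine then some "9"
  else none

-- ===== PORT B =====
-- _build() of Source B: flat trie of the reversed digit words; nodes[i] = (digit?, children dict)
def pvBuild : List (Option String × PySem.Dict Char Nat) :=
  ([("one", "1"), ("two", "2"), ("three", "3"), ("four", "4"), ("five", "5"),
    ("six", "6"), ("seven", "7"), ("eight", "8"), ("nine", "9")] :
      List (String × String)).foldl
    (fun nodes wd =>
      let st := wd.1.toList.reverse.foldl
        (fun (st : List (Option String × PySem.Dict Char Nat) × Nat) ch =>
          match (st.1[st.2]?.map Prod.snd).bind (fun d => d.get? ch) with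
          | some nxt => (st.1, nxt)
          | none =>
            let nodes' := st.1 ++ [(none, PySem.Dict.mk [])]
            let nxt := nodes'.length - 1
            (nodes'.modify st.2 (fun p => (p.1, p.2.insert ch nxt)), nxt))
        (nodes, 0)
      st.1.modify st.2 (fun p => (some wd.2, p.2)))
    [(none, PySem.Dict.mk [])]

def pvNodes : List (Option String × PySem.Dict Char Nat) := pvBuild

-- the loop of get_most_recent_number in Source B (early returns become the base cases)
def pvWalk (nodes : List (Option String × PySem.Dict Char Nat)) :
    Nat → List Char → Option String
  | _, [] => none
  | i, ch :: rest =>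
    match (nodes[i]?.map Prod.snd).bind (fun d => d.get? ch) with
    | none => none                                -- i = None: return None
    | some j =>
      match nodes[j]?.bind Prod.fst with
      | some d => some d                          -- d is not None: return d
      | none => pvWalk nodes j rest

def get_most_recent_number_alt (word : String) : Option String :=
  pvWalk pvNodes 0 word.toList.reverse

-- ===== PRECONDITION & SPEC =====
def Spec_get_most_recent_number (word : String) (out : Option String) : Prop := out = get_most_recent_number_alt word
instance (word : String) (out : Option String) : Decidable (Spec_get_most_recent_number word out) := by unfold Spec_get_most_recent_number; infer_instance

-- ===== CLAIM (what is proved, stated in full; the proofs are below) =====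
def Claim_equal_get_most_recent_number : Prop := ∀ (word : String), Dom_get_most_recent_number word → Spec_get_most_recent_number word (get_most_recent_number word)

-- ===== LEMMAS AND PROOFS =====

set_option maxRecDepth 4000 in

lemma pvNodes_eq : pvNodes =
    [(none, PySem.Dict.mk [('e',1),('o',4),('r',11),('x',18),('n',21),('t',26)]),
     (none, PySem.Dict.mk [('n',2),('e',7),('v',15)]),
     (none, PySem.Dict.mk [('o',3),('i',31)]),
     (some "1", PySem.Dict.mk []),
     (none, PySem.Dict.mk [('w',5)]),
     (none, PySem.Dict.mk [('t',6)]),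
     (some "2", PySem.Dict.mk []),
     (none, PySem.Dict.mk [('r',8)]),
     (none, PySem.Dict.mk [('h',9)]),
     (none, PySem.Dict.mk [('t',10)]),
     (some "3", PySem.Dict.mk []),
     (none, PySem.Dict.mk [('u',12)]),
     (none, PySem.Dict.mk [('o',13)]),
     (none, PySem.Dict.mk [('f',14)]),
     (some "4", PySem.Dict.mk []),
     (none, PySem.Dict.mk [('i',16)]),
     (none, PySem.Dict.mk [('f',17)]),
     (some "5", PySem.Dict.mk []),
     (none, PySem.Dict.mk [('i',19)]),
     (none, PySem.Dict.mk [('s',20)]),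
     (some "6", PySem.Dict.mk []),
     (none, PySem.Dict.mk [('e',22)]),
     (none, PySem.Dict.mk [('v',23)]),
     (none, PySem.Dict.mk [('e',24)]),
     (none, PySem.Dict.mk [('s',25)]),
     (some "7", PySem.Dict.mk []),
     (none, PySem.Dict.mk [('h',27)]),
     (none, PySem.Dict.mk [('g',28)]),
     (none, PySem.Dict.mk [('i',29)]),
     (none, PySem.Dict.mk [('e',30)]),
     (some "8", PySem.Dict.mk []),
     (none, PySem.Dict.mk [('n',32)]),
     (some "9", PySem.Dict.mk [])] := by decide


set_option maxHeartbeats 1000000 in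
lemma pvStep_0 (ch : Char) (rest : List Char) :
    pvWalk pvNodes 0 (ch :: rest) = if ch = 'e' then pvWalk pvNodes 1 rest else if ch = 'o' then pvWalk pvNodes 4 rest else if ch = 'r' then pvWalk pvNodes 11 rest else if ch = 'x' then pvWalk pvNodes 18 rest else if ch = 'n' then pvWalk pvNodes 21 rest else if ch = 't' then pvWalk pvNodes 26 rest else none := by
  rw [pvNodes_eq]
  by_cases h0 : 'e' = ch
  · subst h0; simp [pvWalk, PySem.Dict.get?, List.find?]
  by_cases h1 : 'o' = ch
  · subst h1; simp [pvWalk, PySem.Dict.get?, List.find?]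
  by_cases h2 : 'r' = ch
  · subst h2; simp [pvWalk, PySem.Dict.get?, List.find?]
  by_cases h3 : 'x' = ch
  · subst h3; simp [pvWalk, PySem.Dict.get?, List.find?]
  by_cases h4 : 'n' = ch
  · subst h4; simp [pvWalk, PySem.Dict.get?, List.find?]
  by_cases h5 : 't' = ch
  · subst h5; simp [pvWalk, PySem.Dict.get?, List.find?]
  have f0 : (('e' : Char) == ch) = false := beq_eq_false_iff_ne.mpr h0
  have f1 : (('o' : Char) == ch) = false := beq_eq_false_iff_ne.mpr h1
  have f2 : (('r' : Char) == ch) = false := beq_eq_false_iff_ne.mpr h2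
  have f3 : (('x' : Char) == ch) = false := beq_eq_false_iff_ne.mpr h3
  have f4 : (('n' : Char) == ch) = false := beq_eq_false_iff_ne.mpr h4
  have f5 : (('t' : Char) == ch) = false := beq_eq_false_iff_ne.mpr h5
  have g0 : ¬ ch = 'e' := fun h => h0 h.symm
  have g1 : ¬ ch = 'o' := fun h => h1 h.symm
  have g2 : ¬ ch = 'r' := fun h => h2 h.symm
  have g3 : ¬ ch = 'x' := fun h => h3 h.symm
  have g4 : ¬ ch = 'n' := fun h => h4 h.symm
  have g5 : ¬ ch = 't' := fun h => h5 h.symm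
  simp [pvWalk, PySem.Dict.get?, List.find?, f0, f1, f2, f3, f4, f5, g0, g1, g2, g3, g4, g5]

set_option maxHeartbeats 1000000 in
lemma pvStep_1 (ch : Char) (rest : List Char) :
    pvWalk pvNodes 1 (ch :: rest) = if ch = 'n' then pvWalk pvNodes 2 rest else if ch = 'e' then pvWalk pvNodes 7 rest else if ch = 'v' then pvWalk pvNodes 15 rest else none := by
  rw [pvNodes_eq]
  by_cases h0 : 'n' = ch
  · subst h0; simp [pvWalk, PySem.Dict.get?, List.find?]
  by_cases h1 : 'e' = ch
  · subst h1; simp [pvWalk, PySem.Dict.get?, List.find?]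
  by_cases h2 : 'v' = ch
  · subst h2; simp [pvWalk, PySem.Dict.get?, List.find?]
  have f0 : (('n' : Char) == ch) = false := beq_eq_false_iff_ne.mpr h0
  have f1 : (('e' : Char) == ch) = false := beq_eq_false_iff_ne.mpr h1
  have f2 : (('v' : Char) == ch) = false := beq_eq_false_iff_ne.mpr h2
  have g0 : ¬ ch = 'n' := fun h => h0 h.symm
  have g1 : ¬ ch = 'e' := fun h => h1 h.symm
  have g2 : ¬ ch = 'v' := fun h => h2 h.symm
  simp [pvWalk, PySem.Dict.get?, List.find?, f0, f1, f2, g0, g1, g2]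

set_option maxHeartbeats 1000000 in
lemma pvStep_2 (ch : Char) (rest : List Char) :
    pvWalk pvNodes 2 (ch :: rest) = if ch = 'o' then some "1" else if ch = 'i' then pvWalk pvNodes 31 rest else none := by
  rw [pvNodes_eq]
  by_cases h0 : 'o' = ch
  · subst h0; simp [pvWalk, PySem.Dict.get?, List.find?]
  by_cases h1 : 'i' = ch
  · subst h1; simp [pvWalk, PySem.Dict.get?, List.find?]
  have f0 : (('o' : Char) == ch) = false := beq_eq_false_iff_ne.mpr h0
  have f1 : (('i' : Char) == ch) = false := beq_eq_false_iff_ne.mpr h1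
  have g0 : ¬ ch = 'o' := fun h => h0 h.symm
  have g1 : ¬ ch = 'i' := fun h => h1 h.symm
  simp [pvWalk, PySem.Dict.get?, List.find?, f0, f1, g0, g1]

set_option maxHeartbeats 1000000 in
lemma pvStep_4 (ch : Char) (rest : List Char) :
    pvWalk pvNodes 4 (ch :: rest) = if ch = 'w' then pvWalk pvNodes 5 rest else none := by
  rw [pvNodes_eq]
  by_cases h0 : 'w' = ch
  · subst h0; simp [pvWalk, PySem.Dict.get?, List.find?]
  have f0 : (('w' : Char) == ch) = false := beq_eq_false_iff_ne.mpr h0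
  have g0 : ¬ ch = 'w' := fun h => h0 h.symm
  simp [pvWalk, PySem.Dict.get?, List.find?, f0, g0]

set_option maxHeartbeats 1000000 in
lemma pvStep_5 (ch : Char) (rest : List Char) :
    pvWalk pvNodes 5 (ch :: rest) = if ch = 't' then some "2" else none := by
  rw [pvNodes_eq]
  by_cases h0 : 't' = ch
  · subst h0; simp [pvWalk, PySem.Dict.get?, List.find?]
  have f0 : (('t' : Char) == ch) = false := beq_eq_false_iff_ne.mpr h0
  have g0 : ¬ ch = 't' := fun h => h0 h.symm
  simp [pvWalk, PySem.Dict.get?, List.find?, f0, g0]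

set_option maxHeartbeats 1000000 in
lemma pvStep_7 (ch : Char) (rest : List Char) :
    pvWalk pvNodes 7 (ch :: rest) = if ch = 'r' then pvWalk pvNodes 8 rest else none := by
  rw [pvNodes_eq]
  by_cases h0 : 'r' = ch
  · subst h0; simp [pvWalk, PySem.Dict.get?, List.find?]
  have f0 : (('r' : Char) == ch) = false := beq_eq_false_iff_ne.mpr h0
  have g0 : ¬ ch = 'r' := fun h => h0 h.symm
  simp [pvWalk, PySem.Dict.get?, List.find?, f0, g0]

set_option maxHeartbeats 1000000 in
lemma pvStep_8 (ch : Char) (rest : List Char) :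
    pvWalk pvNodes 8 (ch :: rest) = if ch = 'h' then pvWalk pvNodes 9 rest else none := by
  rw [pvNodes_eq]
  by_cases h0 : 'h' = ch
  · subst h0; simp [pvWalk, PySem.Dict.get?, List.find?]
  have f0 : (('h' : Char) == ch) = false := beq_eq_false_iff_ne.mpr h0
  have g0 : ¬ ch = 'h' := fun h => h0 h.symm
  simp [pvWalk, PySem.Dict.get?, List.find?, f0, g0]

set_option maxHeartbeats 1000000 in
lemma pvStep_9 (ch : Char) (rest : List Char) :
    pvWalk pvNodes 9 (ch :: rest) = if ch = 't' then some "3" else none := by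
  rw [pvNodes_eq]
  by_cases h0 : 't' = ch
  · subst h0; simp [pvWalk, PySem.Dict.get?, List.find?]
  have f0 : (('t' : Char) == ch) = false := beq_eq_false_iff_ne.mpr h0
  have g0 : ¬ ch = 't' := fun h => h0 h.symm
  simp [pvWalk, PySem.Dict.get?, List.find?, f0, g0]

set_option maxHeartbeats 1000000 in
lemma pvStep_11 (ch : Char) (rest : List Char) :
    pvWalk pvNodes 11 (ch :: rest) = if ch = 'u' then pvWalk pvNodes 12 rest else none := by
  rw [pvNodes_eq]
  by_cases h0 : 'u' = ch
  · subst h0; simp [pvWalk, PySem.Dict.get?, List.find?]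
  have f0 : (('u' : Char) == ch) = false := beq_eq_false_iff_ne.mpr h0
  have g0 : ¬ ch = 'u' := fun h => h0 h.symm
  simp [pvWalk, PySem.Dict.get?, List.find?, f0, g0]

set_option maxHeartbeats 1000000 in
lemma pvStep_12 (ch : Char) (rest : List Char) :
    pvWalk pvNodes 12 (ch :: rest) = if ch = 'o' then pvWalk pvNodes 13 rest else none := by
  rw [pvNodes_eq]
  by_cases h0 : 'o' = ch
  · subst h0; simp [pvWalk, PySem.Dict.get?, List.find?]
  have f0 : (('o' : Char) == ch) = false := beq_eq_false_iff_ne.mpr h0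
  have g0 : ¬ ch = 'o' := fun h => h0 h.symm
  simp [pvWalk, PySem.Dict.get?, List.find?, f0, g0]

set_option maxHeartbeats 1000000 in
lemma pvStep_13 (ch : Char) (rest : List Char) :
    pvWalk pvNodes 13 (ch :: rest) = if ch = 'f' then some "4" else none := by
  rw [pvNodes_eq]
  by_cases h0 : 'f' = ch
  · subst h0; simp [pvWalk, PySem.Dict.get?, List.find?]
  have f0 : (('f' : Char) == ch) = false := beq_eq_false_iff_ne.mpr h0
  have g0 : ¬ ch = 'f' := fun h => h0 h.symm
  simp [pvWalk, PySem.Dict.get?, List.find?, f0, g0]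

set_option maxHeartbeats 1000000 in
lemma pvStep_15 (ch : Char) (rest : List Char) :
    pvWalk pvNodes 15 (ch :: rest) = if ch = 'i' then pvWalk pvNodes 16 rest else none := by
  rw [pvNodes_eq]
  by_cases h0 : 'i' = ch
  · subst h0; simp [pvWalk, PySem.Dict.get?, List.find?]
  have f0 : (('i' : Char) == ch) = false := beq_eq_false_iff_ne.mpr h0
  have g0 : ¬ ch = 'i' := fun h => h0 h.symm
  simp [pvWalk, PySem.Dict.get?, List.find?, f0, g0]

set_option maxHeartbeats 1000000 in
lemma pvStep_16 (ch : Char) (rest : List Char) :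
    pvWalk pvNodes 16 (ch :: rest) = if ch = 'f' then some "5" else none := by
  rw [pvNodes_eq]
  by_cases h0 : 'f' = ch
  · subst h0; simp [pvWalk, PySem.Dict.get?, List.find?]
  have f0 : (('f' : Char) == ch) = false := beq_eq_false_iff_ne.mpr h0
  have g0 : ¬ ch = 'f' := fun h => h0 h.symm
  simp [pvWalk, PySem.Dict.get?, List.find?, f0, g0]

set_option maxHeartbeats 1000000 in
lemma pvStep_18 (ch : Char) (rest : List Char) :
    pvWalk pvNodes 18 (ch :: rest) = if ch = 'i' then pvWalk pvNodes 19 rest else none := by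
  rw [pvNodes_eq]
  by_cases h0 : 'i' = ch
  · subst h0; simp [pvWalk, PySem.Dict.get?, List.find?]
  have f0 : (('i' : Char) == ch) = false := beq_eq_false_iff_ne.mpr h0
  have g0 : ¬ ch = 'i' := fun h => h0 h.symm
  simp [pvWalk, PySem.Dict.get?, List.find?, f0, g0]

set_option maxHeartbeats 1000000 in
lemma pvStep_19 (ch : Char) (rest : List Char) :
    pvWalk pvNodes 19 (ch :: rest) = if ch = 's' then some "6" else none := by
  rw [pvNodes_eq]
  by_cases h0 : 's' = ch
  · subst h0; simp [pvWalk, PySem.Dict.get?, List.find?]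
  have f0 : (('s' : Char) == ch) = false := beq_eq_false_iff_ne.mpr h0
  have g0 : ¬ ch = 's' := fun h => h0 h.symm
  simp [pvWalk, PySem.Dict.get?, List.find?, f0, g0]

set_option maxHeartbeats 1000000 in
lemma pvStep_21 (ch : Char) (rest : List Char) :
    pvWalk pvNodes 21 (ch :: rest) = if ch = 'e' then pvWalk pvNodes 22 rest else none := by
  rw [pvNodes_eq]
  by_cases h0 : 'e' = ch
  · subst h0; simp [pvWalk, PySem.Dict.get?, List.find?]
  have f0 : (('e' : Char) == ch) = false := beq_eq_false_iff_ne.mpr h0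
  have g0 : ¬ ch = 'e' := fun h => h0 h.symm
  simp [pvWalk, PySem.Dict.get?, List.find?, f0, g0]

set_option maxHeartbeats 1000000 in
lemma pvStep_22 (ch : Char) (rest : List Char) :
    pvWalk pvNodes 22 (ch :: rest) = if ch = 'v' then pvWalk pvNodes 23 rest else none := by
  rw [pvNodes_eq]
  by_cases h0 : 'v' = ch
  · subst h0; simp [pvWalk, PySem.Dict.get?, List.find?]
  have f0 : (('v' : Char) == ch) = false := beq_eq_false_iff_ne.mpr h0
  have g0 : ¬ ch = 'v' := fun h => h0 h.symm
  simp [pvWalk, PySem.Dict.get?, List.find?, f0, g0]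

set_option maxHeartbeats 1000000 in
lemma pvStep_23 (ch : Char) (rest : List Char) :
    pvWalk pvNodes 23 (ch :: rest) = if ch = 'e' then pvWalk pvNodes 24 rest else none := by
  rw [pvNodes_eq]
  by_cases h0 : 'e' = ch
  · subst h0; simp [pvWalk, PySem.Dict.get?, List.find?]
  have f0 : (('e' : Char) == ch) = false := beq_eq_false_iff_ne.mpr h0
  have g0 : ¬ ch = 'e' := fun h => h0 h.symm
  simp [pvWalk, PySem.Dict.get?, List.find?, f0, g0]

set_option maxHeartbeats 1000000 in
lemma pvStep_24 (ch : Char) (rest : List Char) :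
    pvWalk pvNodes 24 (ch :: rest) = if ch = 's' then some "7" else none := by
  rw [pvNodes_eq]
  by_cases h0 : 's' = ch
  · subst h0; simp [pvWalk, PySem.Dict.get?, List.find?]
  have f0 : (('s' : Char) == ch) = false := beq_eq_false_iff_ne.mpr h0
  have g0 : ¬ ch = 's' := fun h => h0 h.symm
  simp [pvWalk, PySem.Dict.get?, List.find?, f0, g0]

set_option maxHeartbeats 1000000 in
lemma pvStep_26 (ch : Char) (rest : List Char) :
    pvWalk pvNodes 26 (ch :: rest) = if ch = 'h' then pvWalk pvNodes 27 rest else none := by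
  rw [pvNodes_eq]
  by_cases h0 : 'h' = ch
  · subst h0; simp [pvWalk, PySem.Dict.get?, List.find?]
  have f0 : (('h' : Char) == ch) = false := beq_eq_false_iff_ne.mpr h0
  have g0 : ¬ ch = 'h' := fun h => h0 h.symm
  simp [pvWalk, PySem.Dict.get?, List.find?, f0, g0]

set_option maxHeartbeats 1000000 in
lemma pvStep_27 (ch : Char) (rest : List Char) :
    pvWalk pvNodes 27 (ch :: rest) = if ch = 'g' then pvWalk pvNodes 28 rest else none := by
  rw [pvNodes_eq]
  by_cases h0 : 'g' = ch
  · subst h0; simp [pvWalk, PySem.Dict.get?, List.find?]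
  have f0 : (('g' : Char) == ch) = false := beq_eq_false_iff_ne.mpr h0
  have g0 : ¬ ch = 'g' := fun h => h0 h.symm
  simp [pvWalk, PySem.Dict.get?, List.find?, f0, g0]

set_option maxHeartbeats 1000000 in
lemma pvStep_28 (ch : Char) (rest : List Char) :
    pvWalk pvNodes 28 (ch :: rest) = if ch = 'i' then pvWalk pvNodes 29 rest else none := by
  rw [pvNodes_eq]
  by_cases h0 : 'i' = ch
  · subst h0; simp [pvWalk, PySem.Dict.get?, List.find?]
  have f0 : (('i' : Char) == ch) = false := beq_eq_false_iff_ne.mpr h0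
  have g0 : ¬ ch = 'i' := fun h => h0 h.symm
  simp [pvWalk, PySem.Dict.get?, List.find?, f0, g0]

set_option maxHeartbeats 1000000 in
lemma pvStep_29 (ch : Char) (rest : List Char) :
    pvWalk pvNodes 29 (ch :: rest) = if ch = 'e' then some "8" else none := by
  rw [pvNodes_eq]
  by_cases h0 : 'e' = ch
  · subst h0; simp [pvWalk, PySem.Dict.get?, List.find?]
  have f0 : (('e' : Char) == ch) = false := beq_eq_false_iff_ne.mpr h0
  have g0 : ¬ ch = 'e' := fun h => h0 h.symm
  simp [pvWalk, PySem.Dict.get?, List.find?, f0, g0]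

set_option maxHeartbeats 1000000 in
lemma pvStep_31 (ch : Char) (rest : List Char) :
    pvWalk pvNodes 31 (ch :: rest) = if ch = 'n' then some "9" else none := by
  rw [pvNodes_eq]
  by_cases h0 : 'n' = ch
  · subst h0; simp [pvWalk, PySem.Dict.get?, List.find?]
  have f0 : (('n' : Char) == ch) = false := beq_eq_false_iff_ne.mpr h0
  have g0 : ¬ ch = 'n' := fun h => h0 h.symm
  simp [pvWalk, PySem.Dict.get?, List.find?, f0, g0]


lemma pvWalk_nil (nodes : List (Option String × PySem.Dict Char Nat)) (i : Nat) :
    pvWalk nodes i [] = none := rfl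

lemma sliceA_eq0 (word : String) (k : Nat) (hk : k ≤ word.toList.length) :
    PySem.Str.slice word (some ((word.toList.length : Int) - (k : Int))) none
      = String.ofList (word.toList.drop (word.toList.length - k)) := by
  rw [String.ext_iff]
  simp only [PySem.Str.toList_slice, PySem.Chars.slice_eq_listSlice]
  rw [PySem.List.slice_from _ (by omega : (0:Int) ≤ (word.toList.length : Int) - (k : Int))]
  rw [show ((word.toList.length : Int) - (k : Int)).toNat = word.toList.length - k from by omega]
  rw [String.toList_ofList]

lemma sliceA_eq (word : String) (k : Nat) (hk : k ≤ word.length) :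
    PySem.Str.slice word (some ((word.length : Int) - (k : Int))) none
      = String.ofList (word.toList.drop (word.length - k)) := by
  have hk2 : k ≤ word.toList.length := by rw [String.length_toList]; exact hk
  have := sliceA_eq0 word k hk2
  rw [String.length_toList] at this
  exact this

lemma ofList_eq_str (l : List Char) (s : String) : (String.ofList l = s) ↔ l = s.toList := by
  constructor
  · intro h; rw [← h, String.toList_ofList]
  · intro h; rw [h, String.ofList_toList]

lemma str_eq_ofList (s : String) (l : List Char) : (s = String.ofList l) ↔ l = s.toList := by
  rw [eq_comm, ofList_eq_str]

set_option maxHeartbeats 4000000 in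
lemma ab_agree (word : String) : get_most_recent_number word = get_most_recent_number_alt word := by
  have l1 : ("one":String).length = 3 := rfl
  have l2 : ("two":String).length = 3 := rfl
  have l3 : ("three":String).length = 5 := rfl
  have l4 : ("four":String).length = 4 := rfl
  have l5 : ("five":String).length = 4 := rfl
  have l6 : ("six":String).length = 3 := rfl
  have l7 : ("seven":String).length = 5 := rfl
  have l8 : ("eight":String).length = 5 := rfl
  have l9 : ("nine":String).length = 4 := rfl
  have t1 : ("one":String).toList = ['o','n','e'] := rfl
  have t2 : ("two":String).toList = ['t','w','o'] := rfl
  have t3 : ("three":String).toList = ['t','h','r','e','e'] := rfl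
  have t4 : ("four":String).toList = ['f','o','u','r'] := rfl
  have t5 : ("five":String).toList = ['f','i','v','e'] := rfl
  have t6 : ("six":String).toList = ['s','i','x'] := rfl
  have t7 : ("seven":String).toList = ['s','e','v','e','n'] := rfl
  have t8 : ("eight":String).toList = ['e','i','g','h','t'] := rfl
  have t9 : ("nine":String).toList = ['n','i','n','e'] := rfl
  have hlt : word.toList.length = word.length := String.length_toList
  by_cases h3 : word.length < 3
  · have hA : get_most_recent_number word = none := by
      simp [get_most_recent_number, PySem.Str.len_eq, String.length_toList,
        show ¬(2 < word.length) from by omega,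
        show ¬(3 < word.length) from by omega,
        show ¬(4 < word.length) from by omega]
    rw [hA]
    rcases hl : word.toList with _ | ⟨a, _ | ⟨b, _ | ⟨c, t⟩⟩⟩
    · simp [get_most_recent_number_alt, hl, pvWalk_nil]
    · simp only [get_most_recent_number_alt, hl, List.reverse_cons, List.reverse_nil,
        List.nil_append, pvStep_0, pvStep_1, pvStep_2, pvStep_4, pvStep_5, pvStep_7, pvStep_8, pvStep_9, pvStep_11, pvStep_12, pvStep_13, pvStep_15, pvStep_16, pvStep_18, pvStep_19, pvStep_21, pvStep_22, pvStep_23, pvStep_24, pvStep_26, pvStep_27, pvStep_28, pvStep_29, pvStep_31, pvWalk_nil]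
      split_ifs <;> rfl
    · simp only [get_most_recent_number_alt, hl]
      rw [show ([a, b] : List Char).reverse = [b, a] from rfl]
      simp only [pvStep_0, pvStep_1, pvStep_2, pvStep_4, pvStep_5, pvStep_7, pvStep_8, pvStep_9, pvStep_11, pvStep_12, pvStep_13, pvStep_15, pvStep_16, pvStep_18, pvStep_19, pvStep_21, pvStep_22, pvStep_23, pvStep_24, pvStep_26, pvStep_27, pvStep_28, pvStep_29, pvStep_31, pvWalk_nil]
      split_ifs <;> rfl
    · exfalso; rw [hl] at hlt; simp at hlt; omega
  · have e3 := sliceA_eq word 3 (by omega)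
    push_cast at e3
    by_cases h4 : word.length < 4
    · have hL : word.length = 3 := by omega
      obtain ⟨a, b, c, habc⟩ := List.length_eq_three.mp (by omega : word.toList.length = 3)
      rw [habc, hL] at e3
      norm_num at e3
      have hrev : word.toList.reverse = [c, b, a] := by rw [habc]; rfl
      by_cases c1 : a = 'o' ∧ b = 'n' ∧ c = 'e'
      · simp [get_most_recent_number, PySem.Str.len_eq, String.length_toList, l1, l2, l3, l4, l5, l6, l7, l8, l9, t1, t2, t3, t4, t5, t6, t7, t8, t9, hL, e3, ofList_eq_str, str_eq_ofList, pyOne, pyTwo, pyThree, pyFour, pyFive, pySix, pySeven, pyEight, pyNine, get_most_recent_number_alt, hrev, pvStep_0, pvStep_1, pvStep_2, pvStep_4, pvStep_5, pvStep_7, pvStep_8, pvStep_9, pvStep_11, pvStep_12, pvStep_13, pvStep_15, pvStep_16, pvStep_18, pvStep_19, pvStep_21, pvStep_22, pvStep_23, pvStep_24, pvStep_26, pvStep_27, pvStep_28, pvStep_29, pvStep_31, pvWalk_nil, c1.1, c1.2]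
      by_cases c2 : a = 't' ∧ b = 'w' ∧ c = 'o'
      · simp [get_most_recent_number, PySem.Str.len_eq, String.length_toList, l1, l2, l3, l4, l5, l6, l7, l8, l9, t1, t2, t3, t4, t5, t6, t7, t8, t9, hL, e3, ofList_eq_str, str_eq_ofList, pyOne, pyTwo, pyThree, pyFour, pyFive, pySix, pySeven, pyEight, pyNine, get_most_recent_number_alt, hrev, pvStep_0, pvStep_1, pvStep_2, pvStep_4, pvStep_5, pvStep_7, pvStep_8, pvStep_9, pvStep_11, pvStep_12, pvStep_13, pvStep_15, pvStep_16, pvStep_18, pvStep_19, pvStep_21, pvStep_22, pvStep_23, pvStep_24, pvStep_26, pvStep_27, pvStep_28, pvStep_29, pvStep_31, pvWalk_nil, c2.1, c2.2]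
      by_cases c3 : a = 's' ∧ b = 'i' ∧ c = 'x'
      · simp [get_most_recent_number, PySem.Str.len_eq, String.length_toList, l1, l2, l3, l4, l5, l6, l7, l8, l9, t1, t2, t3, t4, t5, t6, t7, t8, t9, hL, e3, ofList_eq_str, str_eq_ofList, pyOne, pyTwo, pyThree, pyFour, pyFive, pySix, pySeven, pyEight, pyNine, get_most_recent_number_alt, hrev, pvStep_0, pvStep_1, pvStep_2, pvStep_4, pvStep_5, pvStep_7, pvStep_8, pvStep_9, pvStep_11, pvStep_12, pvStep_13, pvStep_15, pvStep_16, pvStep_18, pvStep_19, pvStep_21, pvStep_22, pvStep_23, pvStep_24, pvStep_26, pvStep_27, pvStep_28, pvStep_29, pvStep_31, pvWalk_nil, c3.1, c3.2]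
      simp [get_most_recent_number, PySem.Str.len_eq, String.length_toList, l1, l2, l3, l4, l5, l6, l7, l8, l9, t1, t2, t3, t4, t5, t6, t7, t8, t9, hL, e3, ofList_eq_str, str_eq_ofList, pyOne, pyTwo, pyThree, pyFour, pyFive, pySix, pySeven, pyEight, pyNine, c1, c2, c3]
      simp only [get_most_recent_number_alt, hrev, pvStep_0, pvStep_1, pvStep_2, pvStep_4, pvStep_5, pvStep_7, pvStep_8, pvStep_9, pvStep_11, pvStep_12, pvStep_13, pvStep_15, pvStep_16, pvStep_18, pvStep_19, pvStep_21, pvStep_22, pvStep_23, pvStep_24, pvStep_26, pvStep_27, pvStep_28, pvStep_29, pvStep_31, pvWalk_nil]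
      split_ifs <;> simp_all
    · have e4 := sliceA_eq word 4 (by omega)
      push_cast at e4
      by_cases h5 : word.length < 5
      · have hL : word.length = 4 := by omega
        obtain ⟨a, b, c, d, habcd⟩ := List.length_eq_four.mp (by omega : word.toList.length = 4)
        have hd3 : word.toList.drop (word.length - 3) = [b, c, d] := by rw [habcd, hL]; rfl
        have hd4 : word.toList.drop (word.length - 4) = [a, b, c, d] := by rw [habcd, hL]; rfl
        rw [hd3, hL] at e3
        rw [hd4, hL] at e4
        norm_num at e3 e4
        have hrev : word.toList.reverse = [d, c, b, a] := by rw [habcd]; rfl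
        by_cases c1 : b = 'o' ∧ c = 'n' ∧ d = 'e'
        · simp [get_most_recent_number, PySem.Str.len_eq, String.length_toList, l1, l2, l3, l4, l5, l6, l7, l8, l9, t1, t2, t3, t4, t5, t6, t7, t8, t9, hL, e3, e4, ofList_eq_str, str_eq_ofList, pyOne, pyTwo, pyThree, pyFour, pyFive, pySix, pySeven, pyEight, pyNine, get_most_recent_number_alt, hrev, pvStep_0, pvStep_1, pvStep_2, pvStep_4, pvStep_5, pvStep_7, pvStep_8, pvStep_9, pvStep_11, pvStep_12, pvStep_13, pvStep_15, pvStep_16, pvStep_18, pvStep_19, pvStep_21, pvStep_22, pvStep_23, pvStep_24, pvStep_26, pvStep_27, pvStep_28, pvStep_29, pvStep_31, pvWalk_nil, c1.1, c1.2]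
        by_cases c2 : b = 't' ∧ c = 'w' ∧ d = 'o'
        · simp [get_most_recent_number, PySem.Str.len_eq, String.length_toList, l1, l2, l3, l4, l5, l6, l7, l8, l9, t1, t2, t3, t4, t5, t6, t7, t8, t9, hL, e3, e4, ofList_eq_str, str_eq_ofList, pyOne, pyTwo, pyThree, pyFour, pyFive, pySix, pySeven, pyEight, pyNine, get_most_recent_number_alt, hrev, pvStep_0, pvStep_1, pvStep_2, pvStep_4, pvStep_5, pvStep_7, pvStep_8, pvStep_9, pvStep_11, pvStep_12, pvStep_13, pvStep_15, pvStep_16, pvStep_18, pvStep_19, pvStep_21, pvStep_22, pvStep_23, pvStep_24, pvStep_26, pvStep_27, pvStep_28, pvStep_29, pvStep_31, pvWalk_nil, c2.1, c2.2]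
        by_cases c3 : b = 's' ∧ c = 'i' ∧ d = 'x'
        · simp [get_most_recent_number, PySem.Str.len_eq, String.length_toList, l1, l2, l3, l4, l5, l6, l7, l8, l9, t1, t2, t3, t4, t5, t6, t7, t8, t9, hL, e3, e4, ofList_eq_str, str_eq_ofList, pyOne, pyTwo, pyThree, pyFour, pyFive, pySix, pySeven, pyEight, pyNine, get_most_recent_number_alt, hrev, pvStep_0, pvStep_1, pvStep_2, pvStep_4, pvStep_5, pvStep_7, pvStep_8, pvStep_9, pvStep_11, pvStep_12, pvStep_13, pvStep_15, pvStep_16, pvStep_18, pvStep_19, pvStep_21, pvStep_22, pvStep_23, pvStep_24, pvStep_26, pvStep_27, pvStep_28, pvStep_29, pvStep_31, pvWalk_nil, c3.1, c3.2]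
        by_cases c4 : a = 'f' ∧ b = 'o' ∧ c = 'u' ∧ d = 'r'
        · simp [get_most_recent_number, PySem.Str.len_eq, String.length_toList, l1, l2, l3, l4, l5, l6, l7, l8, l9, t1, t2, t3, t4, t5, t6, t7, t8, t9, hL, e3, e4, ofList_eq_str, str_eq_ofList, pyOne, pyTwo, pyThree, pyFour, pyFive, pySix, pySeven, pyEight, pyNine, get_most_recent_number_alt, hrev, pvStep_0, pvStep_1, pvStep_2, pvStep_4, pvStep_5, pvStep_7, pvStep_8, pvStep_9, pvStep_11, pvStep_12, pvStep_13, pvStep_15, pvStep_16, pvStep_18, pvStep_19, pvStep_21, pvStep_22, pvStep_23, pvStep_24, pvStep_26, pvStep_27, pvStep_28, pvStep_29, pvStep_31, pvWalk_nil, c4.1, c4.2]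
        by_cases c5 : a = 'f' ∧ b = 'i' ∧ c = 'v' ∧ d = 'e'
        · simp [get_most_recent_number, PySem.Str.len_eq, String.length_toList, l1, l2, l3, l4, l5, l6, l7, l8, l9, t1, t2, t3, t4, t5, t6, t7, t8, t9, hL, e3, e4, ofList_eq_str, str_eq_ofList, pyOne, pyTwo, pyThree, pyFour, pyFive, pySix, pySeven, pyEight, pyNine, get_most_recent_number_alt, hrev, pvStep_0, pvStep_1, pvStep_2, pvStep_4, pvStep_5, pvStep_7, pvStep_8, pvStep_9, pvStep_11, pvStep_12, pvStep_13, pvStep_15, pvStep_16, pvStep_18, pvStep_19, pvStep_21, pvStep_22, pvStep_23, pvStep_24, pvStep_26, pvStep_27, pvStep_28, pvStep_29, pvStep_31, pvWalk_nil, c5.1, c5.2]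
        by_cases c6 : a = 'n' ∧ b = 'i' ∧ c = 'n' ∧ d = 'e'
        · simp [get_most_recent_number, PySem.Str.len_eq, String.length_toList, l1, l2, l3, l4, l5, l6, l7, l8, l9, t1, t2, t3, t4, t5, t6, t7, t8, t9, hL, e3, e4, ofList_eq_str, str_eq_ofList, pyOne, pyTwo, pyThree, pyFour, pyFive, pySix, pySeven, pyEight, pyNine, get_most_recent_number_alt, hrev, pvStep_0, pvStep_1, pvStep_2, pvStep_4, pvStep_5, pvStep_7, pvStep_8, pvStep_9, pvStep_11, pvStep_12, pvStep_13, pvStep_15, pvStep_16, pvStep_18, pvStep_19, pvStep_21, pvStep_22, pvStep_23, pvStep_24, pvStep_26, pvStep_27, pvStep_28, pvStep_29, pvStep_31, pvWalk_nil, c6.1, c6.2]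
        simp [get_most_recent_number, PySem.Str.len_eq, String.length_toList, l1, l2, l3, l4, l5, l6, l7, l8, l9, t1, t2, t3, t4, t5, t6, t7, t8, t9, hL, e3, e4, ofList_eq_str, str_eq_ofList, pyOne, pyTwo, pyThree, pyFour, pyFive, pySix, pySeven, pyEight, pyNine, c1, c2, c3, c4, c5, c6]
        simp only [get_most_recent_number_alt, hrev, pvStep_0, pvStep_1, pvStep_2, pvStep_4, pvStep_5, pvStep_7, pvStep_8, pvStep_9, pvStep_11, pvStep_12, pvStep_13, pvStep_15, pvStep_16, pvStep_18, pvStep_19, pvStep_21, pvStep_22, pvStep_23, pvStep_24, pvStep_26, pvStep_27, pvStep_28, pvStep_29, pvStep_31, pvWalk_nil]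
        split_ifs <;> simp_all
      · have e5 := sliceA_eq word 5 (by omega)
        push_cast at e5
        have hlen5 : (word.toList.drop (word.length - 5)).length = 5 := by
          rw [List.length_drop, hlt]; omega
        obtain ⟨a, rest, hcons, hr4⟩ : ∃ a rest, word.toList.drop (word.length - 5) = a :: rest ∧ rest.length = 4 := by
          cases h : word.toList.drop (word.length - 5) with
          | nil => rw [h] at hlen5; simp at hlen5
          | cons x xs => exact ⟨x, xs, rfl, by rw [h] at hlen5; simpa using hlen5⟩
        obtain ⟨b, c, d, e, hbcde⟩ := List.length_eq_four.mp hr4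
        have hd5 : word.toList.drop (word.length - 5) = [a, b, c, d, e] := by rw [hcons, hbcde]
        have hsplit : word.toList = word.toList.take (word.length - 5) ++ [a, b, c, d, e] := by
          conv_lhs => rw [← List.take_append_drop (word.length - 5) word.toList]
          rw [hd5]
        have ht : (word.toList.take (word.length - 5)).length = word.length - 5 := by
          rw [List.length_take, hlt]; omega
        have hd4 : word.toList.drop (word.length - 4) = [b, c, d, e] := by
          conv_lhs => rw [hsplit]
          rw [show word.length - 4 = (word.toList.take (word.length - 5)).length + 1 from by rw [ht]; omega,
              List.drop_length_add_append]
          rfl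
        have hd3 : word.toList.drop (word.length - 3) = [c, d, e] := by
          conv_lhs => rw [hsplit]
          rw [show word.length - 3 = (word.toList.take (word.length - 5)).length + 2 from by rw [ht]; omega,
              List.drop_length_add_append]
          rfl
        rw [hd3] at e3
        rw [hd4] at e4
        rw [hd5] at e5
        obtain ⟨tk, htk⟩ : ∃ tk, word.toList.take (word.length - 5) = tk := ⟨_, rfl⟩
        rw [htk] at hsplit ht
        have hrev : word.toList.reverse = e :: d :: c :: b :: a :: tk.reverse := by
          conv_lhs => rw [hsplit]
          simp
        by_cases c1 : c = 'o' ∧ d = 'n' ∧ e = 'e'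
        · simp [get_most_recent_number, PySem.Str.len_eq, String.length_toList, l1, l2, l3, l4, l5, l6, l7, l8, l9, t1, t2, t3, t4, t5, t6, t7, t8, t9, e3, e4, e5, show 2 < word.length from by omega, show 3 < word.length from by omega, show 4 < word.length from by omega, ofList_eq_str, str_eq_ofList, pyOne, pyTwo, pyThree, pyFour, pyFive, pySix, pySeven, pyEight, pyNine, get_most_recent_number_alt, hrev, pvStep_0, pvStep_1, pvStep_2, pvStep_4, pvStep_5, pvStep_7, pvStep_8, pvStep_9, pvStep_11, pvStep_12, pvStep_13, pvStep_15, pvStep_16, pvStep_18, pvStep_19, pvStep_21, pvStep_22, pvStep_23, pvStep_24, pvStep_26, pvStep_27, pvStep_28, pvStep_29, pvStep_31, pvWalk_nil, c1.1, c1.2]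
        by_cases c2 : c = 't' ∧ d = 'w' ∧ e = 'o'
        · simp [get_most_recent_number, PySem.Str.len_eq, String.length_toList, l1, l2, l3, l4, l5, l6, l7, l8, l9, t1, t2, t3, t4, t5, t6, t7, t8, t9, e3, e4, e5, show 2 < word.length from by omega, show 3 < word.length from by omega, show 4 < word.length from by omega, ofList_eq_str, str_eq_ofList, pyOne, pyTwo, pyThree, pyFour, pyFive, pySix, pySeven, pyEight, pyNine, get_most_recent_number_alt, hrev, pvStep_0, pvStep_1, pvStep_2, pvStep_4, pvStep_5, pvStep_7, pvStep_8, pvStep_9, pvStep_11, pvStep_12, pvStep_13, pvStep_15, pvStep_16, pvStep_18, pvStep_19, pvStep_21, pvStep_22, pvStep_23, pvStep_24, pvStep_26, pvStep_27, pvStep_28, pvStep_29, pvStep_31, pvWalk_nil, c2.1, c2.2]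
        by_cases c3 : c = 's' ∧ d = 'i' ∧ e = 'x'
        · simp [get_most_recent_number, PySem.Str.len_eq, String.length_toList, l1, l2, l3, l4, l5, l6, l7, l8, l9, t1, t2, t3, t4, t5, t6, t7, t8, t9, e3, e4, e5, show 2 < word.length from by omega, show 3 < word.length from by omega, show 4 < word.length from by omega, ofList_eq_str, str_eq_ofList, pyOne, pyTwo, pyThree, pyFour, pyFive, pySix, pySeven, pyEight, pyNine, get_most_recent_number_alt, hrev, pvStep_0, pvStep_1, pvStep_2, pvStep_4, pvStep_5, pvStep_7, pvStep_8, pvStep_9, pvStep_11, pvStep_12, pvStep_13, pvStep_15, pvStep_16, pvStep_18, pvStep_19, pvStep_21, pvStep_22, pvStep_23, pvStep_24, pvStep_26, pvStep_27, pvStep_28, pvStep_29, pvStep_31, pvWalk_nil, c3.1, c3.2]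
        by_cases c4 : b = 'f' ∧ c = 'o' ∧ d = 'u' ∧ e = 'r'
        · simp [get_most_recent_number, PySem.Str.len_eq, String.length_toList, l1, l2, l3, l4, l5, l6, l7, l8, l9, t1, t2, t3, t4, t5, t6, t7, t8, t9, e3, e4, e5, show 2 < word.length from by omega, show 3 < word.length from by omega, show 4 < word.length from by omega, ofList_eq_str, str_eq_ofList, pyOne, pyTwo, pyThree, pyFour, pyFive, pySix, pySeven, pyEight, pyNine, get_most_recent_number_alt, hrev, pvStep_0, pvStep_1, pvStep_2, pvStep_4, pvStep_5, pvStep_7, pvStep_8, pvStep_9, pvStep_11, pvStep_12, pvStep_13, pvStep_15, pvStep_16, pvStep_18, pvStep_19, pvStep_21, pvStep_22, pvStep_23, pvStep_24, pvStep_26, pvStep_27, pvStep_28, pvStep_29, pvStep_31, pvWalk_nil, c4.1, c4.2]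
        by_cases c5 : b = 'f' ∧ c = 'i' ∧ d = 'v' ∧ e = 'e'
        · simp [get_most_recent_number, PySem.Str.len_eq, String.length_toList, l1, l2, l3, l4, l5, l6, l7, l8, l9, t1, t2, t3, t4, t5, t6, t7, t8, t9, e3, e4, e5, show 2 < word.length from by omega, show 3 < word.length from by omega, show 4 < word.length from by omega, ofList_eq_str, str_eq_ofList, pyOne, pyTwo, pyThree, pyFour, pyFive, pySix, pySeven, pyEight, pyNine, get_most_recent_number_alt, hrev, pvStep_0, pvStep_1, pvStep_2, pvStep_4, pvStep_5, pvStep_7, pvStep_8, pvStep_9, pvStep_11, pvStep_12, pvStep_13, pvStep_15, pvStep_16, pvStep_18, pvStep_19, pvStep_21, pvStep_22, pvStep_23, pvStep_24, pvStep_26, pvStep_27, pvStep_28, pvStep_29, pvStep_31, pvWalk_nil, c5.1, c5.2]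
        by_cases c6 : b = 'n' ∧ c = 'i' ∧ d = 'n' ∧ e = 'e'
        · simp [get_most_recent_number, PySem.Str.len_eq, String.length_toList, l1, l2, l3, l4, l5, l6, l7, l8, l9, t1, t2, t3, t4, t5, t6, t7, t8, t9, e3, e4, e5, show 2 < word.length from by omega, show 3 < word.length from by omega, show 4 < word.length from by omega, ofList_eq_str, str_eq_ofList, pyOne, pyTwo, pyThree, pyFour, pyFive, pySix, pySeven, pyEight, pyNine, get_most_recent_number_alt, hrev, pvStep_0, pvStep_1, pvStep_2, pvStep_4, pvStep_5, pvStep_7, pvStep_8, pvStep_9, pvStep_11, pvStep_12, pvStep_13, pvStep_15, pvStep_16, pvStep_18, pvStep_19, pvStep_21, pvStep_22, pvStep_23, pvStep_24, pvStep_26, pvStep_27, pvStep_28, pvStep_29, pvStep_31, pvWalk_nil, c6.1, c6.2]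
        by_cases c7 : a = 't' ∧ b = 'h' ∧ c = 'r' ∧ d = 'e' ∧ e = 'e'
        · simp [get_most_recent_number, PySem.Str.len_eq, String.length_toList, l1, l2, l3, l4, l5, l6, l7, l8, l9, t1, t2, t3, t4, t5, t6, t7, t8, t9, e3, e4, e5, show 2 < word.length from by omega, show 3 < word.length from by omega, show 4 < word.length from by omega, ofList_eq_str, str_eq_ofList, pyOne, pyTwo, pyThree, pyFour, pyFive, pySix, pySeven, pyEight, pyNine, get_most_recent_number_alt, hrev, pvStep_0, pvStep_1, pvStep_2, pvStep_4, pvStep_5, pvStep_7, pvStep_8, pvStep_9, pvStep_11, pvStep_12, pvStep_13, pvStep_15, pvStep_16, pvStep_18, pvStep_19, pvStep_21, pvStep_22, pvStep_23, pvStep_24, pvStep_26, pvStep_27, pvStep_28, pvStep_29, pvStep_31, pvWalk_nil, c7.1, c7.2]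
        by_cases c8 : a = 's' ∧ b = 'e' ∧ c = 'v' ∧ d = 'e' ∧ e = 'n'
        · simp [get_most_recent_number, PySem.Str.len_eq, String.length_toList, l1, l2, l3, l4, l5, l6, l7, l8, l9, t1, t2, t3, t4, t5, t6, t7, t8, t9, e3, e4, e5, show 2 < word.length from by omega, show 3 < word.length from by omega, show 4 < word.length from by omega, ofList_eq_str, str_eq_ofList, pyOne, pyTwo, pyThree, pyFour, pyFive, pySix, pySeven, pyEight, pyNine, get_most_recent_number_alt, hrev, pvStep_0, pvStep_1, pvStep_2, pvStep_4, pvStep_5, pvStep_7, pvStep_8, pvStep_9, pvStep_11, pvStep_12, pvStep_13, pvStep_15, pvStep_16, pvStep_18, pvStep_19, pvStep_21, pvStep_22, pvStep_23, pvStep_24, pvStep_26, pvStep_27, pvStep_28, pvStep_29, pvStep_31, pvWalk_nil, c8.1, c8.2]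
        by_cases c9 : a = 'e' ∧ b = 'i' ∧ c = 'g' ∧ d = 'h' ∧ e = 't'
        · simp [get_most_recent_number, PySem.Str.len_eq, String.length_toList, l1, l2, l3, l4, l5, l6, l7, l8, l9, t1, t2, t3, t4, t5, t6, t7, t8, t9, e3, e4, e5, show 2 < word.length from by omega, show 3 < word.length from by omega, show 4 < word.length from by omega, ofList_eq_str, str_eq_ofList, pyOne, pyTwo, pyThree, pyFour, pyFive, pySix, pySeven, pyEight, pyNine, get_most_recent_number_alt, hrev, pvStep_0, pvStep_1, pvStep_2, pvStep_4, pvStep_5, pvStep_7, pvStep_8, pvStep_9, pvStep_11, pvStep_12, pvStep_13, pvStep_15, pvStep_16, pvStep_18, pvStep_19, pvStep_21, pvStep_22, pvStep_23, pvStep_24, pvStep_26, pvStep_27, pvStep_28, pvStep_29, pvStep_31, pvWalk_nil, c9.1, c9.2]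
        simp [get_most_recent_number, PySem.Str.len_eq, String.length_toList, l1, l2, l3, l4, l5, l6, l7, l8, l9, t1, t2, t3, t4, t5, t6, t7, t8, t9, e3, e4, e5, show 2 < word.length from by omega, show 3 < word.length from by omega, show 4 < word.length from by omega, ofList_eq_str, str_eq_ofList, pyOne, pyTwo, pyThree, pyFour, pyFive, pySix, pySeven, pyEight, pyNine, c1, c2, c3, c4, c5, c6, c7, c8, c9]
        simp only [get_most_recent_number_alt, hrev, pvStep_0, pvStep_1, pvStep_2, pvStep_4, pvStep_5, pvStep_7, pvStep_8, pvStep_9, pvStep_11, pvStep_12, pvStep_13, pvStep_15, pvStep_16, pvStep_18, pvStep_19, pvStep_21, pvStep_22, pvStep_23, pvStep_24, pvStep_26, pvStep_27, pvStep_28, pvStep_29, pvStep_31, pvWalk_nil]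
        split_ifs <;> simp_all

-- ===== VERDICT (by name: the statement is the Claim_ definition above) =====
theorem get_most_recent_number_spec : Claim_equal_get_most_recent_number := by
  intro word _
  unfold Spec_get_most_recent_number
  exact ab_agree word
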